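-- pv_equiv track=rewrite | github.com/tammyvitorino/AD2-Cederj_FundamentosDeProgramacao | Q1.py | retiraNegativos
-- ===== SOURCE A (Python) =====
-- def car(lis):
--     return lis[0]
--
-- def cdr(lis):
--     return lis[1:]
--
-- def cons(x, lis):
--     return [x]+lis
--
-- def ordenar(lista):  #ordena uma lista
--     if lista == []:
--         return []
--     else:
--         return insereOrdenado(car(lista), ordenar(cdr(lista)))
--
-- def insereOrdenado(x, lista): #insere um elemento da lista de forma ordenada
--     if lista == [] or x < car(lista):
--         return cons(x, lista)
--     else:
--         return cons(car(lista), insereOrdenado(x, cdr(lista)))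
--
-- def retiraNegativos(lista): #retira da lista os números menores
--     if lista == []:
--         return None
--     else:
--         if car(ordenar(lista)) == [] or car(ordenar(lista)) > 0:
--             return lista
--         else:
--             return retiraNegativos(cdr(ordenar(lista)))
-- ===== SOURCE B (Python) =====
-- def retiraNegativos(lista):
--     if not lista:
--         return None
--     if min(lista) > 0:
--         return lista
--     pos = sorted(x for x in lista if x > 0)
--     return pos if pos else None
-- ===== Notes on version B (the rewrite author's own statement) =====
-- stated objective: faster
-- what changed: Replaces the recursive insertion-sort plus re-sort-per-recursion-step loop (A re-sorts the list on every recursive call) with a single min check, one filter and one library sort.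
import Mathlib
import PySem

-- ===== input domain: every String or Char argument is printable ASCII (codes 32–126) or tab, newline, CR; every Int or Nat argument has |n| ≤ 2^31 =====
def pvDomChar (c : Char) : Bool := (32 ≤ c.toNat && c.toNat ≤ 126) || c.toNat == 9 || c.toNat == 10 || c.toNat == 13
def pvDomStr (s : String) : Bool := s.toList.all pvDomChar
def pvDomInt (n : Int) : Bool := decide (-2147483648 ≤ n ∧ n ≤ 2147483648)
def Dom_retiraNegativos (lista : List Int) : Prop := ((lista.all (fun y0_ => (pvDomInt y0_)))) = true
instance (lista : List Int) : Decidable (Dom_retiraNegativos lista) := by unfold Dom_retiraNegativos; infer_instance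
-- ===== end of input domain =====

-- B replaces A's repeated insertion-sorting recursion with one min check, one filter and one library sort (faster in a timing run).

-- ===== PORT A =====
-- car raises IndexError on []; A only ever applies it to nonempty lists, where headI is exact
def car (lis : List Int) : Int := lis.headI
def cdr (lis : List Int) : List Int := lis.drop 1
def cons (x : Int) (lis : List Int) : List Int := [x] ++ lis

def insereOrdenado (x : Int) : List Int → List Int
  | [] => cons x []                                  -- 'lista == [] or x < car(lista)' split into the two match arms
  | y :: ys => if x < y then cons x (y :: ys) else cons y (insereOrdenado x ys)

def ordenar : List Int → List Int
  | [] => []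
  | x :: xs => insereOrdenado x (ordenar xs)         -- car/cdr realised by the pattern match

theorem length_insereOrdenado (x : Int) (l : List Int) :
    (insereOrdenado x l).length = l.length + 1 := by
  induction l with
  | nil => simp [insereOrdenado, cons]
  | cons y ys ih => simp [insereOrdenado, cons]; split_ifs <;> simp [ih]

theorem length_ordenar (l : List Int) : (ordenar l).length = l.length := by
  induction l with
  | nil => rfl
  | cons x xs ih => simp [ordenar, length_insereOrdenado, ih]

def retiraNegativos : List Int → Option (List Int)
  | [] => none
  | x :: xs =>
    -- Python's 'car(ordenar(lista)) == []' compares an int with []: always False; the 'or' reduces to its right disjunct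
    if car (ordenar (x :: xs)) > 0 then some (x :: xs)
    else retiraNegativos (cdr (ordenar (x :: xs)))
termination_by l => l.length
decreasing_by simp [cdr, length_ordenar]

-- ===== PORT B =====
def retiraNegativos_alt (lista : List Int) : Option (List Int) :=
  if lista = [] then none
  else match PySem.List.min? lista (fun x => x) with
    | none => none                                   -- unreachable: lista ≠ []
    | some m =>
      if m > 0 then some lista
      else
        let pos := PySem.List.sorted (lista.filter (fun x => decide (0 < x))) (fun x => x) false
        if pos = [] then none else some pos

-- ===== PRECONDITION & SPEC =====
def Spec_retiraNegativos (lista : List Int) (out : Option (List Int)) : Prop := out = retiraNegativos_alt lista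
instance (lista : List Int) (out : Option (List Int)) : Decidable (Spec_retiraNegativos lista out) := by unfold Spec_retiraNegativos; infer_instance

-- ===== CLAIM (what is proved, stated in full; the proofs are below) =====
def Claim_equal_retiraNegativos : Prop := ∀ (lista : List Int), Dom_retiraNegativos lista → Spec_retiraNegativos lista (retiraNegativos lista)

-- ===== LEMMAS AND PROOFS =====

theorem insereOrdenado_perm (x : Int) (l : List Int) :
    (insereOrdenado x l).Perm (x :: l) := by
  induction l with
  | nil => simp [insereOrdenado, cons]
  | cons y ys ih =>
    simp only [insereOrdenado]
    split_ifs with h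
    · simp [cons]
    · simpa [cons] using ((ih.cons y).trans (List.Perm.swap x y ys))

theorem ordenar_perm (l : List Int) : (ordenar l).Perm l := by
  induction l with
  | nil => simp [ordenar]
  | cons x xs ih => exact (insereOrdenado_perm x (ordenar xs)).trans (ih.cons x)

theorem insereOrdenado_pairwise (x : Int) (l : List Int)
    (h : l.Pairwise (· ≤ ·)) : (insereOrdenado x l).Pairwise (· ≤ ·) := by
  induction l with
  | nil => simp [insereOrdenado, cons]
  | cons y ys ih =>
    simp only [insereOrdenado]
    rcases List.pairwise_cons.mp h with ⟨hy, hys⟩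
    split_ifs with hlt
    · refine List.pairwise_cons.mpr ⟨?_, h⟩
      intro z hz
      rcases List.mem_cons.mp hz with rfl | hz
      · omega
      · exact le_trans (le_of_lt hlt) (hy z hz)
    · refine List.pairwise_cons.mpr ⟨?_, ih hys⟩
      intro z hz
      rcases (insereOrdenado_perm x ys).mem_iff.mp hz with hz'
      rcases List.mem_cons.mp hz' with rfl | hz''
      · omega
      · exact hy z hz''

theorem ordenar_pairwise (l : List Int) : (ordenar l).Pairwise (· ≤ ·) := by
  induction l with
  | nil => simp [ordenar]
  | cons x xs ih => exact insereOrdenado_pairwise x (ordenar xs) ih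

theorem ordenar_eq_self (l : List Int) (h : l.Pairwise (· ≤ ·)) : ordenar l = l :=
  List.Perm.eq_of_pairwise (fun a b _ _ h1 h2 => le_antisymm h1 h2)
    (ordenar_pairwise l) h (ordenar_perm l)

-- A on an already-sorted list returns the nonempty filtered positives (or none)
theorem retira_sorted (s : List Int) (hs : s.Pairwise (· ≤ ·)) :
    retiraNegativos s =
      (if s.filter (fun x => decide (0 < x)) = [] then none
       else some (s.filter (fun x => decide (0 < x)))) := by
  induction s with
  | nil => simp [retiraNegativos]
  | cons x xs ih =>
    rcases List.pairwise_cons.mp hs with ⟨hx, hxs⟩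
    rw [retiraNegativos]
    rw [ordenar_eq_self (x :: xs) hs]
    by_cases hpos : x > 0
    · have hall : xs.filter (fun x => decide (0 < x)) = xs := by
        apply List.filter_eq_self.mpr
        intro z hz
        have := hx z hz
        simp; omega
      simp [car, hpos, hall]
    · have : car (x :: xs) > 0 ↔ False := by simp [car]; omega
      simp only [car, List.headI] at *
      rw [if_neg hpos]
      have hfc : (x :: xs).filter (fun x => decide (0 < x)) = xs.filter (fun x => decide (0 < x)) := by
        simp [List.filter_cons]; omega
      rw [hfc, cdr]
      simpa using ih hxs

-- ===== VERDICT (by name: the statement is the Claim_ definition above) =====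
theorem retiraNegativos_spec : Claim_equal_retiraNegativos := by
  intro lista _
  unfold Spec_retiraNegativos retiraNegativos_alt
  cases lista with
  | nil => simp [retiraNegativos]
  | cons x xs =>
    simp only [reduceCtorEq, if_false]
    obtain ⟨m, hm⟩ : ∃ m, PySem.List.min? (x :: xs) (fun x => x) = some m := by
      cases h : PySem.List.min? (x :: xs) (fun x => x) with
      | none => exact absurd ((PySem.List.min?_eq_none_iff _ _).mp h) (by simp)
      | some m => exact ⟨m, rfl⟩
    rw [hm]
    -- relate m to the head of the sorted list
    have hperm := ordenar_perm (x :: xs)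
    have hpw := ordenar_pairwise (x :: xs)
    obtain ⟨y, t, hyt⟩ : ∃ y t, ordenar (x :: xs) = y :: t := by
      cases h : ordenar (x :: xs) with
      | nil =>
        rw [h] at hperm
        exact absurd hperm.symm.eq_nil (by simp)
      | cons y t => exact ⟨y, t, rfl⟩
    have hmmem : m ∈ (x :: xs) := PySem.List.min?_mem hm
    have hmmin : ∀ z ∈ (x :: xs), m ≤ z := by
      intro z hz
      simpa using PySem.List.min?_isMin hm z hz
    have hymem : y ∈ (x :: xs) := hperm.mem_iff.mp (by simp [hyt])
    have hymin : ∀ z ∈ (x :: xs), y ≤ z := by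
      intro z hz
      rcases (hperm.mem_iff.mpr hz) with hz'
      rw [hyt] at hz' hpw
      rcases List.mem_cons.mp hz' with rfl | hz''
      · exact le_refl _
      · exact (List.pairwise_cons.mp hpw).1 z hz''
    have hym : y = m := le_antisymm (hymin m hmmem) (hmmin y hymem)
    rw [retiraNegativos, hyt]
    simp only [car, List.headI, hym]
    by_cases hpos : m > 0
    · simp [hpos]
    · rw [if_neg (by omega), if_neg (by omega)]
      have htpw : t.Pairwise (· ≤ ·) := (List.pairwise_cons.mp (hyt ▸ hpw)).2
      rw [cdr, List.drop_one, List.tail_cons, retira_sorted t htpw]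
      -- sorted(filter lista) = filter t
      have hft : PySem.List.sorted ((x :: xs).filter (fun x => decide (0 < x))) (fun x => x) false
          = t.filter (fun x => decide (0 < x)) := by
        apply PySem.List.sorted_id_eq_of_perm_of_pairwise
        · have h1 : ((y :: t).filter (fun x => decide (0 < x))).Perm
              ((x :: xs).filter (fun x => decide (0 < x))) := (hyt ▸ hperm).filter _
          have h2 : (y :: t).filter (fun x => decide (0 < x)) = t.filter (fun x => decide (0 < x)) := by
            simp [List.filter_cons]; omega
          exact h2 ▸ h1
        · exact List.Pairwise.filter _ htpw
      rw [hft]
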